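-- pv_equiv track=rewrite | github.com/KN-Breadboard-Computing/bblang | preflex/generator.py | get_ast_node_name
-- ===== SOURCE A (Python) =====
-- def get_ast_node_name(token: str) -> str:
--     class_name = ""
--     make_upper = True
--     for char in token:
--         if char == "-" or char == "_":
--             make_upper = True
--         elif make_upper:
--             class_name += char.upper()
--             make_upper = False
--         else:
--             class_name += char
--
--     return class_name + 'Node'
-- ===== SOURCE B (Python) =====
-- def _segments(token):
--     # collect the '-'/'_'-separated segments (empty ones included)
--     segments, seg = [], []
--     for ch in token:
--         if ch == "-" or ch == "_":
--             segments.append("".join(seg))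
--             seg = []
--         else:
--             seg.append(ch)
--     segments.append("".join(seg))
--     return segments
--
--
-- def get_ast_node_name(token: str) -> str:
--     return "".join(seg[:1].upper() + seg[1:] for seg in _segments(token)) + "Node"
-- ===== Notes on version B (the rewrite author's own statement) =====
-- stated objective: simpler
-- what changed: Replaced A's one-pass flag machine (make_upper toggled by delimiters while building the output string) by a two-phase pipeline: first collect the dash/underscore-separated segments, then map seg[:1].upper() + seg[1:] over them and join
import Mathlib
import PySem

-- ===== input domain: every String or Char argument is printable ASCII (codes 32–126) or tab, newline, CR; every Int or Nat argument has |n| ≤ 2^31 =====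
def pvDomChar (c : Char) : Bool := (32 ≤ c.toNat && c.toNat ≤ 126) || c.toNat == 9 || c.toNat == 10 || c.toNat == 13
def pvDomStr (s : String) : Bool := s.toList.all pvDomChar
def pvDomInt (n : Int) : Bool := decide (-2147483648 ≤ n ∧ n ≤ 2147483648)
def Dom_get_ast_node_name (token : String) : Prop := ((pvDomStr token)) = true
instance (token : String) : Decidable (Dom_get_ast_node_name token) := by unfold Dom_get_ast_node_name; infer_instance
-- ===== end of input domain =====

-- B replaces A's char-by-char scan with a make_upper flag by a two-phase pipeline:
-- collect the delimiter-separated segments, then capitalise each segment's first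
-- character (seg[:1].upper() + seg[1:]) and join (objective: simpler decomposition).


-- ===== PORT A =====
-- the loop body of A: state is (class_name, make_upper)
def pvStepA (st : List Char × Bool) (c : Char) : List Char × Bool :=
  if c = '-' ∨ c = '_' then (st.1, true)
  else if st.2 then (st.1 ++ PySem.Chars.upper [c], false)
  else (st.1 ++ [c], false)

def get_ast_node_name (token : String) : String :=
  let r := token.toList.foldl pvStepA ([], true)
  String.ofList (r.1 ++ "Node".toList)

-- ===== PORT B =====
-- Source B's _segments loop body: state is (segments, seg)
def pvSplitStep (st : List (List Char) × List Char) (c : Char) : List (List Char) × List Char :=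
  if c = '-' ∨ c = '_' then (st.1 ++ [st.2], [])
  else (st.1, st.2 ++ [c])

-- seg[:1].upper() + seg[1:]
def pvCap (seg : List Char) : List Char :=
  PySem.Chars.upper (seg.take 1) ++ seg.drop 1

def get_ast_node_name_alt (token : String) : String :=
  let st := token.toList.foldl pvSplitStep ([], [])
  let segments := st.1 ++ [st.2]
  String.ofList (PySem.Chars.join [] (segments.map pvCap) ++ "Node".toList)

-- ===== PRECONDITION & SPEC =====
def Spec_get_ast_node_name (token : String) (out : String) : Prop := out = get_ast_node_name_alt token
instance (token : String) (out : String) : Decidable (Spec_get_ast_node_name token out) := by unfold Spec_get_ast_node_name; infer_instance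

-- ===== CLAIM (what is proved, stated in full; the proofs are below) =====
def Claim_equal_get_ast_node_name : Prop := ∀ (token : String), Dom_get_ast_node_name token → Spec_get_ast_node_name token (get_ast_node_name token)

-- ===== LEMMAS AND PROOFS =====

theorem pvCap_append (seg : List Char) (c : Char) (h : seg ≠ []) :
    pvCap (seg ++ [c]) = pvCap seg ++ [c] := by
  cases seg with
  | nil => exact absurd rfl h
  | cons x xs => simp [pvCap]

theorem pvJoin_empty (l : List (List Char)) : PySem.Chars.join [] l = l.flatten := by
  simp only [PySem.Chars.join, List.intercalate]
  induction l with
  | nil => rfl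
  | cons x xs ih => cases xs <;> simp_all [List.intersperse]

-- main invariant: A's state (class_name, make_upper) corresponds to B's state
-- (segments, seg) via class_name = flatten (capped segments) ++ cap seg and
-- make_upper = seg.isEmpty
theorem pvLoop_eq (cs : List Char) : ∀ (ss : List (List Char)) (seg : List Char),
    (cs.foldl pvStepA ((ss.map pvCap).flatten ++ pvCap seg, seg.isEmpty)).1 =
      (((cs.foldl pvSplitStep (ss, seg)).1 ++ [(cs.foldl pvSplitStep (ss, seg)).2]).map pvCap).flatten := by
  induction cs with
  | nil => intro ss seg; simp
  | cons c cs ih =>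
    intro ss seg
    simp only [List.foldl_cons]
    by_cases hd : c = '-' ∨ c = '_'
    · rw [show pvSplitStep (ss, seg) c = (ss ++ [seg], []) from by simp [pvSplitStep, hd],
          show pvStepA ((ss.map pvCap).flatten ++ pvCap seg, seg.isEmpty) c
              = (((ss ++ [seg]).map pvCap).flatten ++ pvCap [], List.isEmpty ([] : List Char)) from by
            simp [pvStepA, hd, pvCap, PySem.Chars.upper]]
      exact ih (ss ++ [seg]) []
    · cases hseg : seg with
      | nil =>
        rw [show pvSplitStep (ss, []) c = (ss, [] ++ [c]) from by simp [pvSplitStep, hd],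
            show pvStepA ((ss.map pvCap).flatten ++ pvCap [], List.isEmpty ([] : List Char)) c
                = ((ss.map pvCap).flatten ++ pvCap ([] ++ [c]), ([] ++ [c]).isEmpty) from by
              simp [pvStepA, hd, pvCap, PySem.Chars.upper]]
        exact ih ss ([] ++ [c])
      | cons x xs =>
        rw [show pvSplitStep (ss, x :: xs) c = (ss, (x :: xs) ++ [c]) from by simp [pvSplitStep, hd],
            show pvStepA ((ss.map pvCap).flatten ++ pvCap (x :: xs), (x :: xs).isEmpty) c
                = ((ss.map pvCap).flatten ++ pvCap ((x :: xs) ++ [c]), ((x :: xs) ++ [c]).isEmpty) from by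
              rw [pvCap_append _ _ (by simp)]; simp [pvStepA, hd]]
        exact ih ss ((x :: xs) ++ [c])

-- ===== VERDICT (by name: the statement is the Claim_ definition above) =====
theorem get_ast_node_name_spec : Claim_equal_get_ast_node_name := by
  intro token _
  show String.ofList ((token.toList.foldl pvStepA ([], true)).1 ++ "Node".toList)
      = String.ofList (PySem.Chars.join []
          (((token.toList.foldl pvSplitStep ([], [])).1
            ++ [(token.toList.foldl pvSplitStep ([], [])).2]).map pvCap) ++ "Node".toList)
  rw [pvJoin_empty]
  have h := pvLoop_eq token.toList [] []
  simp only [List.map_nil, List.flatten_nil, List.nil_append, List.isEmpty_nil] at h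
  rw [show pvCap [] = [] from rfl] at h
  rw [h]
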